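-- pv_equiv track=rewrite | github.com/lotasfrod/ege23 | 25 py/25.220.py | l
-- ===== SOURCE A (Python) =====
-- def l(o):
--     m=''
--     d = [x for x in range(1,o//2+1) if o%x==0]
--     for i in d:
--         c=0
--         for n in range(1,i+1):
--
--             if i%n==0:
--                 c+=1
--         if c==2:
--             m+=str(i)
--     if m>'270101':
--         return m
-- ===== SOURCE B (Python) =====
-- def l(o):
--     # Trial-division factorization up to sqrt: collect distinct prime factors ascending.
--     m = ''
--     n = o
--     p = 2
--     while p * p <= n:
--         if n % p == 0:
--             m += str(p)
--             while n % p == 0: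
--                 n //= p
--         p += 1
--     if n > 1 and n < o:  # leftover large prime factor (excluded when o itself is prime)
--         m += str(n)
--     return m if m > '270101' else None
-- ===== Notes on version B (the rewrite author's own statement) =====
-- stated objective: faster
-- what changed: Replaces the scan of all divisors up to o//2 with a divisor-count primality test per divisor by a single trial-division factorization up to sqrt(o) that emits the distinct prime factors in ascending order.
import Mathlib
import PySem

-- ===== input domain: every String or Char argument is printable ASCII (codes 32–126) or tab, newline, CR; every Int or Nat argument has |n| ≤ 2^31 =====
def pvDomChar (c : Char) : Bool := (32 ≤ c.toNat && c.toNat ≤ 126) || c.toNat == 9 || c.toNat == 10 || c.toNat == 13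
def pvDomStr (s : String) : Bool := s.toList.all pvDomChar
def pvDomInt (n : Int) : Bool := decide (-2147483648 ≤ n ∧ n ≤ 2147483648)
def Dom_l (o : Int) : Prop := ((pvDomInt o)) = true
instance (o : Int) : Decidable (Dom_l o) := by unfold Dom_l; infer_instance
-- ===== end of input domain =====

-- B replaces A's O(o^2) scan (all divisors up to o//2, each primality-tested by counting its
-- divisors) with a single trial-division factorization up to sqrt(o); same return value.

-- ===== PORT A =====
def l (o : Int) : Option String :=
  let d := (PySem.List.pyRange 1 (PySem.Int.floordiv o 2 + 1) 1).filter
    (fun x => PySem.Int.mod o x == 0)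
  let m := d.foldl (fun m i =>
    let c := (PySem.List.pyRange 1 (i + 1) 1).foldl
      (fun c n => if PySem.Int.mod i n == 0 then c + 1 else c) (0 : Int)
    if c == 2 then m ++ PySem.Int.toStr i else m) ""
  if "270101" < m then some m else none

-- ===== PORT B =====
-- inner loop `while n % p == 0: n //= p` of Source B (the guards beyond `n % p == 0` only make the
-- recursion total; they hold on every state Source B reaches)
def pvReduce (n p : Int) : Int :=
  if h : 2 ≤ p ∧ 1 ≤ n ∧ PySem.Int.mod n p = 0 then
    pvReduce (PySem.Int.floordiv n p) p
  else n
termination_by n.toNat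
decreasing_by
  rw [PySem.Int.floordiv_eq_ediv_of_pos (by omega)]
  have h1 : n / p < n := Int.ediv_lt_of_lt_mul (by omega) (by nlinarith [h.1, h.2.1])
  have h2 : 0 ≤ n / p := Int.ediv_nonneg (by omega) (by omega)
  omega

-- needed by pvTrial's termination proof
theorem pvReduce_le (n p : Int) : pvReduce n p ≤ n := by
  fun_induction pvReduce n p with
  | case1 n h ih =>
    have hle : PySem.Int.floordiv n p ≤ n := by
      rw [PySem.Int.floordiv_eq_ediv_of_pos (by omega)]
      have h1 : n / p < n := Int.ediv_lt_of_lt_mul (by omega) (by nlinarith [h.1, h.2.1])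
      omega
    omega
  | case2 n h => omega

-- outer `while p * p <= n` loop of Source B; returns (m, n) at loop exit
def pvTrial (n p : Int) (m : String) : String × Int :=
  if h : p * p ≤ n ∧ 2 ≤ p then
    if PySem.Int.mod n p = 0 then
      pvTrial (pvReduce n p) (p + 1) (m ++ PySem.Int.toStr p)
    else
      pvTrial n (p + 1) m
  else (m, n)
termination_by (n - p).toNat
decreasing_by
  · have h2p : 2 * p ≤ p * p := by nlinarith [h.2]
    have := pvReduce_le n p
    omega
  · have h2p : 2 * p ≤ p * p := by nlinarith [h.2]
    omega

def l_alt (o : Int) : Option String :=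
  let r := pvTrial o 2 ""
  let m := if 1 < r.2 ∧ r.2 < o then r.1 ++ PySem.Int.toStr r.2 else r.1
  if "270101" < m then some m else none

-- ===== PRECONDITION & SPEC =====
def Spec_l (o : Int) (out : Option String) : Prop := out = l_alt o
instance (o : Int) (out : Option String) : Decidable (Spec_l o out) := by unfold Spec_l; infer_instance

-- ===== CLAIM (what is proved, stated in full; the proofs are below) =====
def Claim_equal_l : Prop := ∀ (o : Int), Dom_l o → Spec_l o (l o)

-- ===== LEMMAS AND PROOFS =====

-- concatenation of a list of strings (proof-side spec object)
def pvCat : List String → String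
  | [] => ""
  | s :: r => s ++ pvCat r

-- the common specification list: the primes q < o with q ∣ o, in ascending order
def pvSpec (o : Int) : List Nat :=
  (List.range o.toNat).filter (fun q => decide (q.Prime ∧ (q : Int) ∣ o))

-- all prime divisors of n (including n itself when n is prime), ascending
def pvSpecAll (n : Int) : List Nat :=
  (List.range (n.toNat + 1)).filter (fun q => decide (q.Prime ∧ (q : Int) ∣ n))

theorem pvSorted_eq_of_mem_iff {α : Type} [LinearOrder α] {L1 L2 : List α}
    (h1 : L1.Pairwise (· < ·)) (h2 : L2.Pairwise (· < ·))
    (hm : ∀ x, x ∈ L1 ↔ x ∈ L2) : L1 = L2 := by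
  have n1 : L1.Nodup := h1.imp ne_of_lt
  have n2 : L2.Nodup := h2.imp ne_of_lt
  exact List.Perm.eq_of_pairwise (fun a b _ _ hab hba => absurd hba (lt_asymm hab)) h1 h2
    ((List.perm_ext_iff_of_nodup n1 n2).mpr hm)

theorem pvNatCount (N : Nat) (hN : 1 ≤ N) :
    ((List.range N).countP (fun k => decide ((k+1) ∣ N)) = 2) ↔ N.Prime := by
  rcases Nat.lt_or_ge N 2 with h2 | h2
  · interval_cases N
    decide
  · rw [List.countP_eq_length_filter]
    set L := (List.range N).filter (fun k => decide ((k+1) ∣ N)) with hL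
    have hmem : ∀ k, k ∈ L ↔ k < N ∧ (k+1) ∣ N := by
      intro k; simp [hL, List.mem_filter, List.mem_range]
    constructor
    · intro hlen
      by_contra hnp
      obtain ⟨m, hm1, hm2, hm3⟩ := Nat.exists_dvd_of_not_prime2 h2 hnp
      have hsub : [0, m-1, N-1] ⊆ L := by
        intro x hx
        simp only [List.mem_cons, List.not_mem_nil, or_false] at hx
        rcases hx with rfl | rfl | rfl
        · exact (hmem _).mpr ⟨by omega, one_dvd _⟩
        · exact (hmem _).mpr ⟨by omega, by rwa [Nat.sub_add_cancel (by omega)]⟩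
        · exact (hmem _).mpr ⟨by omega, by rw [Nat.sub_add_cancel (by omega)]⟩
      have hnd : ([0, m-1, N-1] : List Nat).Nodup := by
        simp [List.nodup_cons]; omega
      have := (hnd.subperm hsub).length_le
      simp at this; omega
    · intro hp
      have : L = [0, N-1] := by
        have hpl : L.Pairwise (· < ·) := (List.pairwise_lt_range).filter _
        apply pvSorted_eq_of_mem_iff hpl
        · exact List.Pairwise.cons (by intro b hb; simp at hb; omega) (by simp)
        · intro x
          rw [hmem]
          constructor
          · rintro ⟨hx1, hx2⟩
            rcases (Nat.Prime.eq_one_or_self_of_dvd hp _ hx2) with h | h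
            · simp [show x = 0 by omega]
            · simp [show x = N-1 by omega]
          · intro hx
            simp only [List.mem_cons, List.not_mem_nil, or_false] at hx
            rcases hx with rfl | rfl
            · exact ⟨by omega, one_dvd _⟩
            · exact ⟨by omega, by rw [Nat.sub_add_cancel (by omega)]⟩
      rw [this]; rfl

theorem pvSpecAll_one : pvSpecAll 1 = [] := by decide

theorem pvSpec_one : pvSpec 1 = [] := by decide

theorem pvSpecAll_of_prime (n : Int) (h1 : 1 ≤ n) (hp : n.toNat.Prime) :
    pvSpecAll n = [n.toNat] := by
  unfold pvSpecAll
  apply pvSorted_eq_of_mem_iff ((List.pairwise_lt_range).filter _)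
    (List.pairwise_singleton _ _)
  intro q
  simp only [List.mem_filter, List.mem_range, decide_eq_true_eq, List.mem_singleton]
  constructor
  · rintro ⟨hq1, hqp, hqd⟩
    have hqd' : q ∣ n.toNat := by
      have : (q:Int) ∣ (n.toNat : Int) := by rwa [Int.toNat_of_nonneg (by omega)]
      exact_mod_cast this
    exact (Nat.prime_dvd_prime_iff_eq hqp hp).mp hqd'
  · rintro rfl
    refine ⟨by omega, hp, ?_⟩
    rw [Int.toNat_of_nonneg (by omega)]

theorem pvSpec_of_prime (o : Int) (h1 : 1 ≤ o) (hp : o.toNat.Prime) :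
    pvSpec o = [] := by
  unfold pvSpec
  rw [List.filter_eq_nil_iff]
  intro q hq
  simp only [List.mem_range] at hq
  simp only [decide_eq_true_eq, not_and]
  intro hqp hqd
  have hqd' : q ∣ o.toNat := by
    have : (q:Int) ∣ (o.toNat : Int) := by rwa [Int.toNat_of_nonneg (by omega)]
    exact_mod_cast this
  have := (Nat.prime_dvd_prime_iff_eq hqp hp).mp hqd'
  omega

theorem pvSpec_eq_specAll (o : Int) (h1 : 1 ≤ o) (hnp : ¬ o.toNat.Prime) :
    pvSpec o = pvSpecAll o := by
  unfold pvSpec pvSpecAll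
  rw [List.range_succ, List.filter_append]
  have : List.filter (fun q : Nat => decide (q.Prime ∧ (q : Int) ∣ o)) [o.toNat] = [] := by
    simp [hnp]
  rw [this, List.append_nil]

theorem pvSpecAll_cons (n p n' : Int) (k : Nat)
    (hn : 1 ≤ n) (hp2 : 2 ≤ p) (hpp : p.toNat.Prime)
    (hk : n = p ^ k * n') (hk1 : 1 ≤ k) (hnd : ¬ p ∣ n') (hn' : 1 ≤ n')
    (hinv' : ∀ q : Nat, q.Prime → (q : Int) ∣ n' → p + 1 ≤ (q : Int)) :
    pvSpecAll n = p.toNat :: pvSpecAll n' := by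
  have hn'n : n' ≤ n := by
    have hpk : p ^ 1 ≤ p ^ k := pow_le_pow_right₀ (by omega) (by omega)
    have hpk2 : p ≤ p ^ k := by simpa using hpk
    have : 2 * n' ≤ p ^ k * n' := by
      exact mul_le_mul_of_nonneg_right (by omega) (by omega)
    omega
  unfold pvSpecAll
  apply pvSorted_eq_of_mem_iff ((List.pairwise_lt_range).filter _)
  · apply List.Pairwise.cons
    · intro b hb
      simp only [List.mem_filter, List.mem_range, decide_eq_true_eq] at hb
      have := hinv' b hb.2.1 hb.2.2
      omega
    · exact (List.pairwise_lt_range).filter _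
  · intro q
    simp only [List.mem_filter, List.mem_range, decide_eq_true_eq, List.mem_cons]
    have hpprime : Prime (p : Int) := by
      have : Prime ((p.toNat : Nat) : Int) := Nat.prime_iff_prime_int.mp hpp
      rwa [Int.toNat_of_nonneg (by omega)] at this
    constructor
    · rintro ⟨hq1, hqp, hqd⟩
      have hqprime : Prime ((q : Nat) : Int) := Nat.prime_iff_prime_int.mp hqp
      rw [hk] at hqd
      rcases (Prime.dvd_mul hqprime).mp hqd with hl | hr
      · left
        have : (q : Int) ∣ p := hqprime.dvd_of_dvd_pow hl
        have hqp' : q ∣ p.toNat := by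
          have h2 : (q:Int) ∣ (p.toNat : Int) := by rwa [Int.toNat_of_nonneg (by omega)]
          exact_mod_cast h2
        exact (Nat.prime_dvd_prime_iff_eq hqp hpp).mp hqp'
      · right
        refine ⟨?_, hqp, hr⟩
        have := Int.le_of_dvd (by omega) hr
        omega
    · rintro (rfl | ⟨hq1, hqp, hqd⟩)
      · have hpdvdn : p ∣ n := by
          rw [hk]
          exact Dvd.dvd.mul_right (dvd_pow_self p (by omega)) n'
        refine ⟨?_, hpp, ?_⟩
        · have := Int.le_of_dvd (by omega) hpdvdn
          omega
        · rw [Int.toNat_of_nonneg (by omega)]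
          exact hpdvdn
      · refine ⟨by omega, hqp, ?_⟩
        rw [hk]
        exact Dvd.dvd.mul_left hqd _

-- A's inner divisor-count loop is a primality test
theorem pvCount_prime_iff (i : Int) (hi : 1 ≤ i) :
    ((PySem.List.pyRange 1 (i + 1) 1).countP (fun n => decide (PySem.Int.mod i n = 0)) = 2)
      ↔ i.toNat.Prime := by
  rw [PySem.List.pyRange_one, List.countP_map]
  have hcast : i = (i.toNat : Int) := (Int.toNat_of_nonneg (by omega)).symm
  have he : ((i + 1 - 1).toNat) = i.toNat := by omega
  rw [he]
  have : ∀ k ∈ List.range i.toNat,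
      ((fun n => decide (PySem.Int.mod i n = 0)) ∘ (fun k : Nat => (1 : Int) + k)) k
        = (fun k => decide ((k+1) ∣ i.toNat)) k := by
    intro k _
    simp only [Function.comp_apply]
    rw [decide_eq_decide]
    rw [PySem.Int.mod_eq_zero_iff_dvd]
    have h1 : ((1:Int) + (k:Int)) = ((k+1 : Nat) : Int) := by push_cast; ring
    rw [h1, ← Int.natCast_dvd_natCast, ← hcast]
  rw [List.countP_congr (by intro x hx; rw [this x hx])]
  exact pvNatCount i.toNat (by omega)

-- A's divisor list, filtered by its primality test, is exactly the spec list
theorem pvA_filter_eq (o : Int) :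
    ((PySem.List.pyRange 1 (PySem.Int.floordiv o 2 + 1) 1).filter
        (fun x => PySem.Int.mod o x == 0)).filter
      (fun i => ((PySem.List.pyRange 1 (i + 1) 1).foldl
          (fun c n => if PySem.Int.mod i n == 0 then c + 1 else c) (0 : Int)) == 2)
      = List.map (fun q : Nat => (q : Int)) (pvSpec o) := by
  apply pvSorted_eq_of_mem_iff
  · exact ((PySem.List.pairwise_lt_pyRange_one 1 (PySem.Int.floordiv o 2 + 1)).filter _).filter _
  · unfold pvSpec
    rw [List.pairwise_map]
    exact ((List.pairwise_lt_range).filter _).imp (fun h => by exact_mod_cast h)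
  · intro x
    simp only [List.mem_filter, List.mem_map, pvSpec, List.mem_range,
      PySem.List.mem_pyRange_one, Bool.and_eq_true, decide_eq_true_eq,
      PySem.List.foldl_ite_add_one, zero_add, beq_iff_eq]
    rw [PySem.Int.floordiv_eq_ediv_of_pos (by omega : (0:Int) < 2)]
    constructor
    · rintro ⟨⟨⟨hx1, hx2⟩, hdvd⟩, hc⟩
      have hdvd' : x ∣ o := (PySem.Int.mod_eq_zero_iff_dvd o x).mp hdvd
      have hprime : x.toNat.Prime := (pvCount_prime_iff x hx1).mp (by exact_mod_cast hc)
      have hx2' : x * 2 ≤ o := (Int.le_ediv_iff_mul_le (by omega)).mp (by omega)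
      have hxpos : 2 ≤ x := by have := hprime.two_le; omega
      refine ⟨x.toNat, ⟨by omega, hprime, ?_⟩, Int.toNat_of_nonneg (by omega)⟩
      rw [Int.toNat_of_nonneg (by omega)]; exact hdvd'
    · rintro ⟨q, ⟨hq1, hqp, hqd⟩, rfl⟩
      have hq2 : (2:Int) ≤ q := by exact_mod_cast hqp.two_le
      have ho1 : 1 ≤ o := by omega
      obtain ⟨t, ht⟩ := hqd
      have hlt : (q:Int) < o := by omega
      have ht2 : 2 ≤ t := by
        by_contra hcon
        push_neg at hcon
        nlinarith [mul_le_mul_of_nonneg_left (by omega : t ≤ 1) (by omega : (0:Int) ≤ (q:Int))]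
      have hle : (q:Int) ≤ o / 2 := by
        rw [Int.le_ediv_iff_mul_le (by omega)]
        nlinarith
      refine ⟨⟨⟨by omega, by omega⟩, ?_⟩, ?_⟩
      · rw [PySem.Int.mod_eq_zero_iff_dvd]; exact ⟨t, ht⟩
      · have := (pvCount_prime_iff (q:Int) (by omega)).mpr (by simpa using hqp)
        exact_mod_cast this

theorem pvFoldl_append_if {α : Type} (C : α → Bool) (f : α → String) :
    ∀ (L : List α) (m0 : String),
      L.foldl (fun m i => if C i then m ++ f i else m) m0
        = m0 ++ pvCat ((L.filter C).map f) := by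
  intro L
  induction L with
  | nil => intro m0; simp [pvCat]
  | cons a L ih =>
    intro m0
    by_cases h : C a
    · simp [List.foldl_cons, h, ih, pvCat, String.append_assoc]
    · simp [List.foldl_cons, h, ih]

theorem pvA_eq (o : Int) :
    l o = (if "270101" < pvCat (List.map (fun q : Nat => PySem.Int.toStr (q : Int)) (pvSpec o))
        then some (pvCat (List.map (fun q : Nat => PySem.Int.toStr (q : Int)) (pvSpec o))) else none) := by
  unfold l
  simp only []
  rw [pvFoldl_append_if (fun i => ((PySem.List.pyRange 1 (i + 1) 1).foldl
      (fun c n => if PySem.Int.mod i n == 0 then c + 1 else c) (0 : Int)) == 2) PySem.Int.toStr]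
  rw [pvA_filter_eq, List.map_map]
  rfl

theorem pvReduce_spec (n p : Int) (hn : 1 ≤ n) (hp : 2 ≤ p) :
    ∃ k : Nat, n = p ^ k * pvReduce n p ∧ ¬ (p ∣ pvReduce n p) ∧ 1 ≤ pvReduce n p := by
  fun_induction pvReduce n p with
  | case1 n h ih =>
    have hd : p ∣ n := (PySem.Int.mod_eq_zero_iff_dvd n p).mp h.2.2
    have hstep : pvReduce n p = pvReduce (PySem.Int.floordiv n p) p := by
      rw [pvReduce, dif_pos h]
    have hq1 : 1 ≤ PySem.Int.floordiv n p := by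
      rw [PySem.Int.floordiv_eq_ediv_of_pos (by omega)]
      rw [Int.le_ediv_iff_mul_le (by omega)]
      have := Int.le_of_dvd (by omega) hd
      omega
    obtain ⟨k, hk1, hk2, hk3⟩ := ih hq1
    obtain ⟨c, hc⟩ := hd
    have hfc : PySem.Int.floordiv n p = c := by
      rw [PySem.Int.floordiv_eq_ediv_of_pos (by omega), hc,
        Int.mul_ediv_cancel_left _ (by omega : p ≠ 0)]
    rw [hfc] at hk1
    refine ⟨k + 1, ?_, hk2, hk3⟩
    rw [hfc, hc]
    nth_rewrite 1 [hk1]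
    ring
  | case2 n h =>
    refine ⟨0, by ring, ?_, hn⟩
    intro hd
    exact h ⟨hp, hn, (PySem.Int.mod_eq_zero_iff_dvd n p).mpr hd⟩

-- loop invariant of B's trial division
theorem pvTrial_spec (n p : Int) (m : String) :
    2 ≤ p → 1 ≤ n → (∀ q : Nat, q.Prime → (q : Int) ∣ n → p ≤ (q : Int)) →
    ((pvTrial n p m).1 ++ (if 1 < (pvTrial n p m).2 then PySem.Int.toStr (pvTrial n p m).2 else "")
        = m ++ pvCat (List.map (fun q : Nat => PySem.Int.toStr (q : Int)) (pvSpecAll n))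
      ∧ (pvTrial n p m).2 ≤ n ∧ 1 ≤ (pvTrial n p m).2
      ∧ ((pvTrial n p m).2 = n ↔ (n = 1 ∨ n.toNat.Prime))) := by
  fun_induction pvTrial n p m with
  | case1 n p m h hmod ih =>
    intro hp hn hinv
    have hd : p ∣ n := (PySem.Int.mod_eq_zero_iff_dvd n p).mp hmod
    obtain ⟨k, hk, hnd, hn'⟩ := pvReduce_spec n p hn hp
    have hk1 : 1 ≤ k := by
      rcases Nat.eq_zero_or_pos k with rfl | hpos
      · exfalso
        apply hnd
        simp only [pow_zero, one_mul] at hk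
        rwa [← hk]
      · exact hpos
    have hppN : p.toNat.Prime := by
      have hq0p : (p.toNat.minFac).Prime := Nat.minFac_prime (by omega)
      have hq0dp : ((p.toNat.minFac : Nat) : Int) ∣ p := by
        have h5 : ((p.toNat.minFac : Nat):Int) ∣ (p.toNat:Int) := Int.natCast_dvd_natCast.mpr (Nat.minFac_dvd _)
        rwa [Int.toNat_of_nonneg (by omega)] at h5
      have hge := hinv _ hq0p (hq0dp.trans hd)
      have hle : ((p.toNat.minFac : Nat) : Int) ≤ p := by
        have := Nat.minFac_le (show 0 < p.toNat by omega)
        omega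
      have heq : p.toNat.minFac = p.toNat := by omega
      rw [← heq]
      exact hq0p
    have hinv' : ∀ q : Nat, q.Prime → (q : Int) ∣ pvReduce n p → p + 1 ≤ (q : Int) := by
      intro q hq hdq
      have hdn : (q : Int) ∣ n := by
        rw [hk]; exact hdq.mul_left _
      have h1 := hinv q hq hdn
      have h2 : (q : Int) ≠ p := fun he => hnd (he ▸ hdq)
      omega
    obtain ⟨ih1, ih2, ih3, ih4⟩ := ih (by omega) hn' hinv'
    have hcons := pvSpecAll_cons n p (pvReduce n p) k hn hp hppN hk hk1 hnd hn' hinv'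
    have hlt : pvReduce n p < n := by
      have hpk : p ^ 1 ≤ p ^ k := pow_le_pow_right₀ (by omega) (by omega)
      have hpk2 : p ≤ p ^ k := by simpa using hpk
      have h2 : 2 * pvReduce n p ≤ p ^ k * pvReduce n p := mul_le_mul_of_nonneg_right (by omega) (by omega)
      omega
    refine ⟨?_, by omega, ih3, ?_⟩
    · rw [ih1, hcons]
      simp only [List.map_cons, pvCat]
      rw [Int.toNat_of_nonneg (by omega : (0:Int) ≤ p)]
      rw [String.append_assoc]
    · constructor
      · intro he; omega
      · rintro (h1 | hpr)
        · exfalso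
          have h5 : 4 ≤ n := by nlinarith [h.1, h.2]
          omega
        · exfalso
          have hpd : p.toNat ∣ n.toNat := by
            have h3 : (p.toNat : Int) ∣ (n.toNat : Int) := by
              rw [Int.toNat_of_nonneg (by omega : (0:Int) ≤ p),
                Int.toNat_of_nonneg (by omega : (0:Int) ≤ n)]
              exact hd
            exact_mod_cast h3
          have heq2 : p.toNat = n.toNat := (Nat.prime_dvd_prime_iff_eq hppN hpr).mp hpd
          have hpn : p < n := by nlinarith [h.1, h.2]
          omega
  | case2 n p m h hmod ih =>
    intro hp hn hinv
    refine ih (by omega) hn ?_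
    intro q hq hdq
    have h1 := hinv q hq hdq
    have h2 : (q : Int) ≠ p := by
      intro he
      apply hmod
      rw [PySem.Int.mod_eq_zero_iff_dvd]
      rw [← he]
      exact hdq
    omega
  | case3 n p m h =>
    intro hp hn hinv
    have hlt' : n < p * p := by
      have : ¬ (p * p ≤ n) := fun hh => h ⟨hh, hp⟩
      omega
    have hor : n = 1 ∨ n.toNat.Prime := by
      by_cases h1 : n = 1
      · exact Or.inl h1
      · right
        have hn2 : 2 ≤ n := by omega
        have hqp : (n.toNat.minFac).Prime := Nat.minFac_prime (by omega)
        have hqd : ((n.toNat.minFac : Nat) : Int) ∣ n := by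
          have h5 : ((n.toNat.minFac : Nat):Int) ∣ (n.toNat:Int) := Int.natCast_dvd_natCast.mpr (Nat.minFac_dvd _)
          rwa [Int.toNat_of_nonneg (by omega)] at h5
        have hge := hinv _ hqp hqd
        by_contra hnp
        have hsq : n.toNat.minFac * n.toNat.minFac ≤ n.toNat := by
          have := Nat.minFac_sq_le_self (by omega) hnp
          simpa [pow_two] using this
        have hsq' : ((n.toNat.minFac : Nat) : Int) * ((n.toNat.minFac : Nat) : Int) ≤ n := by
          have h6 : ((n.toNat.minFac * n.toNat.minFac : Nat) : Int) ≤ (n.toNat : Int) := by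
            exact_mod_cast hsq
          push_cast at h6
          rwa [Int.toNat_of_nonneg (by omega)] at h6
        nlinarith [hge, hsq', hlt', mul_le_mul hge hge (by omega : (0:Int) ≤ p) (by omega : (0:Int) ≤ ((n.toNat.minFac : Nat):Int))]
    refine ⟨?_, le_refl n, hn, iff_of_true rfl hor⟩
    rcases hor with h1 | hpr
    · subst h1
      rw [pvSpecAll_one]
      simp [pvCat]
    · have h2 : 2 ≤ n := by
        have := hpr.two_le
        omega
      rw [pvSpecAll_of_prime n (by omega) hpr]
      rw [if_pos (by omega : (1:Int) < n)]
      simp only [List.map_cons, List.map_nil, pvCat]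
      rw [Int.toNat_of_nonneg (by omega : (0:Int) ≤ n)]
      rw [String.append_empty]

theorem pvStr_cancel (a b : String) (h : a ++ b = b) : a = "" := by
  have h2 : a ++ b = "" ++ b := by rw [h, String.empty_append]
  exact (String.append_left_inj b).mp h2

theorem pvB_m_eq (o : Int) :
    (if 1 < (pvTrial o 2 "").2 ∧ (pvTrial o 2 "").2 < o
        then (pvTrial o 2 "").1 ++ PySem.Int.toStr (pvTrial o 2 "").2
        else (pvTrial o 2 "").1)
      = pvCat (List.map (fun q : Nat => PySem.Int.toStr (q : Int)) (pvSpec o)) := by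
  by_cases ho : 1 ≤ o
  · obtain ⟨h1, h2, h3, h4⟩ := pvTrial_spec o 2 "" (by omega) ho
      (fun q hq _ => by exact_mod_cast hq.two_le)
    rw [String.empty_append] at h1
    by_cases hro : (pvTrial o 2 "").2 = o
    · rw [if_neg (by omega : ¬ (1 < (pvTrial o 2 "").2 ∧ (pvTrial o 2 "").2 < o))]
      rcases h4.mp hro with hone | hpr
      · subst hone
        rw [pvSpec_one]
        rw [pvSpecAll_one, hro, if_neg (by omega : ¬ ((1:Int) < 1))] at h1
        simpa [pvCat] using h1
      · have ho2 : 2 ≤ o := by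
          have := hpr.two_le
          omega
        rw [pvSpec_of_prime o ho hpr]
        rw [pvSpecAll_of_prime o ho hpr, hro, if_pos (by omega : (1:Int) < o)] at h1
        simp only [List.map_cons, List.map_nil, pvCat, String.append_empty] at h1
        rw [Int.toNat_of_nonneg (by omega : (0:Int) ≤ o)] at h1
        simp only [List.map_nil, pvCat]
        exact pvStr_cancel _ _ h1
    · have hlt : (pvTrial o 2 "").2 < o := lt_of_le_of_ne h2 hro
      have hnotor : ¬ (o = 1 ∨ o.toNat.Prime) := fun hh => hro (h4.mpr hh)
      rw [pvSpec_eq_specAll o ho (fun hp => hnotor (Or.inr hp))]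
      by_cases h12 : 1 < (pvTrial o 2 "").2
      · rw [if_pos ⟨h12, hlt⟩]
        rw [if_pos h12] at h1
        exact h1
      · rw [if_neg (fun hh => h12 hh.1)]
        rw [if_neg h12, String.append_empty] at h1
        exact h1
  · have htr : pvTrial o 2 "" = ("", o) := by
      rw [pvTrial, dif_neg (by omega : ¬ ((2:Int) * 2 ≤ o ∧ (2:Int) ≤ 2))]
    rw [htr]
    simp only []
    rw [if_neg (by omega : ¬ ((1:Int) < o ∧ o < o))]
    have hs : pvSpec o = [] := by
      unfold pvSpec
      have : o.toNat = 0 := by omega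
      rw [this]
      rfl
    rw [hs]
    rfl

theorem pvB_eq (o : Int) :
    l_alt o = (if "270101" < pvCat (List.map (fun q : Nat => PySem.Int.toStr (q : Int)) (pvSpec o))
        then some (pvCat (List.map (fun q : Nat => PySem.Int.toStr (q : Int)) (pvSpec o))) else none) := by
  unfold l_alt
  dsimp only
  rw [pvB_m_eq]

-- ===== VERDICT (by name: the statement is the Claim_ definition above) =====
theorem l_spec : Claim_equal_l := by
  intro o _
  unfold Spec_l
  rw [pvA_eq, pvB_eq]
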